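-- pv_equiv track=rewrite | github.com/Ventmaster/GFGPoTD | 15 Nov - Better String.py | betterString
-- ===== SOURCE A (Python) =====
-- def betterString(str1, str2):
--     def distinctsubsequence(s):
--         n = len(s)
--
--         dp = [0] * (n+1)
--         dp[0] = 1
--
--         map = {}
--
--         for i in range(1, n+1):
--             dp[i] = 2 * dp[i-1]
--
--             ch = s[i-1]
--
--             if ch in map:
--                 j = map[ch]
--
--                 dp[i] = dp[i] - dp[j-1]
--
--             map[ch]=i
--
--         return dp[n]
--
--     if distinctsubsequence(str1)>=distinctsubsequence(str2):
--         return str1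
--     else:
--         return str2
-- ===== SOURCE B (Python) =====
-- def betterString(str1, str2):
--     def distinctsubsequence(s):
--         # ends[ch] = number of distinct non-empty subsequences ending in ch
--         ends = {}
--         for ch in s:
--             ends[ch] = 1 + sum(ends.values())
--         return 1 + sum(ends.values())
--
--     if distinctsubsequence(str1) >= distinctsubsequence(str2):
--         return str1
--     else:
--         return str2
-- ===== Notes on version B (the rewrite author's own statement) =====
-- stated objective: alternative
-- what changed: B counts distinct subsequences with a dict of counts of subsequences ending in each character, updated additively (ends[ch] = 1 + sum(ends.values())), instead of A's position-indexed dp array with doubling and a subtraction keyed by a last-occurrence index map.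
import Mathlib
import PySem

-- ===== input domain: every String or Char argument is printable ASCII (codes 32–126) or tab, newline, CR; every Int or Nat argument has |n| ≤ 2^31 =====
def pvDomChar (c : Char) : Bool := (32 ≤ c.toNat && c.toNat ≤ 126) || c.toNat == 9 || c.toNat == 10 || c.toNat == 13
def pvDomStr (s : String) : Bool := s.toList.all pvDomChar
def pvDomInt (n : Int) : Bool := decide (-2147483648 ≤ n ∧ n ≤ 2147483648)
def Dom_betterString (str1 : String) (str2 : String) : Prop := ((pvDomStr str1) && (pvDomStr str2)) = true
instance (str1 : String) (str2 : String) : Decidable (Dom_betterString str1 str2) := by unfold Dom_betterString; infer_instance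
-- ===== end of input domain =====

-- B counts distinct subsequences with a dict of per-character "ending" counts updated additively,
-- instead of A's position-indexed dp array with doubling and a last-occurrence index map; an
-- alternative algorithm of similar cost, proved to return the same string.

-- ===== PORT A =====
-- one loop iteration of A's `for i in range(1, n+1)` (state: the dp list and the last-occurrence map)
def pvStepA (cs : List Char) (st : List Int × PySem.Dict Char Int) (i : Int) :
    List Int × PySem.Dict Char Int :=
  -- dp[i] = 2 * dp[i-1]
  let dp := PySem.List.pySetD st.1 i (2 * PySem.List.pyGetD st.1 (i - 1) 0)
  -- ch = s[i-1]  (index always in range here, so the total pyGetD form is exact)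
  let ch := PySem.List.pyGetD cs (i - 1) ' '
  -- if ch in map: j = map[ch]; dp[i] = dp[i] - dp[j-1]
  let dp :=
    if st.2.contains ch then
      PySem.List.pySetD dp i
        (PySem.List.pyGetD dp i 0 - PySem.List.pyGetD dp (st.2.getD ch 0 - 1) 0)
    else dp
  -- map[ch] = i
  (dp, st.2.insert ch i)

def pvDistinctA (cs : List Char) : Int :=
  let n : Int := cs.length
  -- dp = [0]*(n+1); dp[0] = 1
  let dp0 : List Int := (List.replicate (cs.length + 1) (0 : Int)).set 0 1
  let st := (PySem.List.pyRange 1 (n + 1) 1).foldl (pvStepA cs) (dp0, PySem.Dict.empty)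
  PySem.List.pyGetD st.1 n 0

def betterString (str1 : String) (str2 : String) : String :=
  if pvDistinctA str1.toList ≥ pvDistinctA str2.toList then str1 else str2

-- ===== PORT B =====
-- ends[ch] = 1 + sum(ends.values())
def pvStepB (d : PySem.Dict Char Int) (ch : Char) : PySem.Dict Char Int :=
  d.insert ch (1 + d.values.sum)

def pvDistinctB (cs : List Char) : Int :=
  1 + (cs.foldl pvStepB PySem.Dict.empty).values.sum

def betterString_alt (str1 : String) (str2 : String) : String :=
  if pvDistinctB str1.toList ≥ pvDistinctB str2.toList then str1 else str2

-- ===== PRECONDITION & SPEC =====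
def Spec_betterString (str1 : String) (str2 : String) (out : String) : Prop := out = betterString_alt str1 str2
instance (str1 : String) (str2 : String) (out : String) : Decidable (Spec_betterString str1 str2 out) := by unfold Spec_betterString; infer_instance

-- ===== CLAIM (what is proved, stated in full; the proofs are below) =====
def Claim_equal_betterString : Prop := ∀ (str1 : String) (str2 : String), Dom_betterString str1 str2 → Spec_betterString str1 str2 (betterString str1 str2)

-- ===== LEMMAS AND PROOFS =====

def pvStA (cs : List Char) (i : Nat) : List Int × PySem.Dict Char Int :=
  (PySem.List.pyRange 1 ((i : Int) + 1) 1).foldl (pvStepA cs)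
    ((List.replicate (cs.length + 1) (0 : Int)).set 0 1, PySem.Dict.empty)

def pvStB (cs : List Char) (i : Nat) : PySem.Dict Char Int :=
  (cs.take i).foldl pvStepB PySem.Dict.empty

lemma pvStA_zero (cs : List Char) :
    pvStA cs 0 = ((List.replicate (cs.length + 1) (0 : Int)).set 0 1, PySem.Dict.empty) := by
  simp [pvStA, PySem.List.pyRange_one_eq_nil]

lemma pvStA_succ (cs : List Char) (i : Nat) :
    pvStA cs (i + 1) = pvStepA cs (pvStA cs i) ((i : Int) + 1) := by
  unfold pvStA
  rw [show ((i + 1 : Nat) : Int) + 1 = ((i : Int) + 1) + 1 by push_cast; ring,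
      PySem.List.pyRange_one_succ_right (by omega : (1 : Int) ≤ (i : Int) + 1),
      List.foldl_append]
  rfl

lemma pvStB_succ (cs : List Char) (i : Nat) (h : i < cs.length) :
    pvStB cs (i + 1) = pvStepB (pvStB cs i) cs[i] := by
  unfold pvStB
  have ht : cs.take (i + 1) = cs.take i ++ [cs[i]] := by
    rw [List.take_add_one, List.getElem?_eq_getElem h]
    rfl
  rw [ht, List.foldl_append]
  rfl

lemma pv_overwrite_sum (l : List (Char × Int)) (k : Char) (v w : Int)
    (hnd : (l.map (·.1)).Nodup) (hw : (k, w) ∈ l) :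
    ((l.map (fun p => if p.1 == k then (k, v) else p)).map (·.2)).sum
      = (l.map (·.2)).sum + v - w := by
  induction l with
  | nil => cases hw
  | cons p l ih =>
    simp only [List.map_cons] at hnd
    obtain ⟨h1, h2⟩ := List.nodup_cons.mp hnd
    by_cases hk : p.1 = k
    · have hpw : p = (k, w) := by
        rcases List.mem_cons.mp hw with h | h
        · exact h.symm
        · exact absurd (hk ▸ List.mem_map_of_mem h : p.1 ∈ l.map (·.1)) h1
      have hmap : l.map (fun q => if q.1 == k then (k, v) else q) = l := by
        have hall : ∀ q ∈ l, (if q.1 == k then (k, v) else q) = q := by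
          intro q hq
          have : (q.1 == k) = false := by
            rw [beq_eq_false_iff_ne]
            intro e
            exact h1 (hk ▸ e ▸ List.mem_map_of_mem hq)
          rw [this]
          simp
        calc l.map (fun q => if q.1 == k then (k, v) else q) = l.map id :=
              List.map_congr_left hall
          _ = l := List.map_id l
      subst hpw
      rw [List.map_cons, if_pos (by simp), hmap, List.map_cons, List.sum_cons,
          List.map_cons, List.sum_cons]
      ring
    · have hw' : (k, w) ∈ l := by
        rcases List.mem_cons.mp hw with h | h
        · exact absurd (congrArg Prod.fst h.symm) hk
        · exact h
      rw [List.map_cons, if_neg (by simp [hk]), List.map_cons, List.sum_cons,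
          List.map_cons, List.sum_cons, ih h2 hw']
      ring

lemma pv_values_sum_insert (d : PySem.Dict Char Int) (h : d.keys.Nodup) (k : Char) (v : Int) :
    (d.insert k v).values.sum = d.values.sum + v - d.getD k 0 := by
  by_cases hc : d.contains k = true
  · have hk : k ∈ d.items.map (·.1) := by
      simpa [PySem.Dict.keys] using (PySem.Dict.contains_iff_mem_keys d k).mp hc
    obtain ⟨p, hp, hpk⟩ := List.mem_map.mp hk
    have hpm : (k, p.2) ∈ d.items := by rw [← hpk]; exact hp
    have hget : d.get? k = some p.2 := PySem.Dict.get?_of_mem_items d hpm h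
    have hgetD : d.getD k 0 = p.2 := by
      rw [PySem.Dict.getD_eq_get?_getD, hget]; rfl
    have hnd' : (d.items.map (·.1)).Nodup := by simpa [PySem.Dict.keys] using h
    simp only [PySem.Dict.values, PySem.Dict.items_insert_of_contains d v hc, hgetD]
    exact pv_overwrite_sum d.items k v p.2 hnd' hpm
  · have hc' : d.contains k = false := by simpa using hc
    simp only [PySem.Dict.values, PySem.Dict.items_insert_of_not_contains d v hc',
      PySem.Dict.getD_of_not_contains d 0 hc', List.map_append, List.sum_append]
    simp

lemma pv_inv (cs : List Char) (i : Nat) (hi : i ≤ cs.length) :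
    (pvStA cs i).1.length = cs.length + 1 ∧
    PySem.List.pyGetD (pvStA cs i).1 (i : Int) 0 = 1 + (pvStB cs i).values.sum ∧
    (pvStB cs i).keys.Nodup ∧
    ∀ ch : Char,
      ((pvStA cs i).2.get? ch = none ∧ (pvStB cs i).get? ch = none) ∨
      ∃ (j : Nat) (v : Int), (pvStA cs i).2.get? ch = some (j : Int) ∧ 1 ≤ j ∧ j ≤ i ∧
        (pvStB cs i).get? ch = some v ∧ PySem.List.pyGetD (pvStA cs i).1 ((j : Int) - 1) 0 = v := by
  induction i with
  | zero =>
    rw [pvStA_zero]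
    unfold pvStB
    refine ⟨by simp, ?_, by simp, ?_⟩
    · simp [PySem.List.pyGetD_zero, List.replicate_succ, PySem.Dict.values, PySem.Dict.empty]
    · intro ch
      left
      simp [PySem.Dict.get?_empty]
  | succ i ih =>
    have hi' : i < cs.length := by omega
    obtain ⟨hlen, hval, hnd, hmap⟩ := ih (by omega)
    rw [pvStA_succ, pvStB_succ cs i hi']
    simp only [pvStepA, pvStepB]
    have hcast : ((i : Int) + 1) = ((i + 1 : Nat) : Int) := by push_cast; ring
    have hch : PySem.List.pyGetD cs ((i : Int) + 1 - 1) ' ' = cs[i] := by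
      rw [show (i : Int) + 1 - 1 = ((i : Nat) : Int) by ring]
      simp [hi']
    have hgi : PySem.List.pyGetD (pvStA cs i).1 ((i : Int) + 1 - 1) 0
        = 1 + (pvStB cs i).values.sum := by
      rw [show (i : Int) + 1 - 1 = ((i : Nat) : Int) by ring]
      exact hval
    rw [hch, hgi, hcast]
    have hlt : i + 1 < (pvStA cs i).1.length := by omega
    by_cases hc : (pvStA cs i).2.contains cs[i] = true
    · rcases hmap cs[i] with ⟨hA, hB⟩ | ⟨j, v, hj, h1j, hji, hev, hdpv⟩
      · rw [PySem.Dict.contains_eq_isSome_get?, hA] at hc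
        simp at hc
      · have hgetD : (pvStA cs i).2.getD cs[i] 0 = (j : Int) := by
          rw [PySem.Dict.getD_eq_get?_getD, hj]; rfl
        rw [if_pos hc, hgetD,
            show (j : Int) - 1 = ((j - 1 : Nat) : Int) by omega]
        rw [show (j : Int) - 1 = ((j - 1 : Nat) : Int) by omega] at hdpv
        rw [PySem.List.pyGetD_pySetD_natCast _ _ _ _ _ hlt,
            PySem.List.pyGetD_pySetD_natCast _ _ _ _ _ hlt,
            if_pos rfl, if_neg (by omega), hdpv]
        have hsum : ((pvStB cs i).insert cs[i] (1 + (pvStB cs i).values.sum)).values.sum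
            = (pvStB cs i).values.sum + (1 + (pvStB cs i).values.sum) - v := by
          rw [pv_values_sum_insert _ hnd, PySem.Dict.getD_eq_get?_getD, hev]
          rfl
        refine ⟨by simp [PySem.List.length_pySetD, hlen], ?_,
            PySem.Dict.nodup_keys_insert _ _ _ hnd, ?_⟩
        · rw [PySem.List.pyGetD_pySetD_natCast _ _ _ _ _ (by simp [PySem.List.length_pySetD]; omega),
              if_pos rfl, hsum]
          ring
        · intro ch
          by_cases hE : ch = cs[i]
          · subst hE
            refine Or.inr ⟨i + 1, 1 + (pvStB cs i).values.sum, ?_, by omega, by omega, ?_, ?_⟩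
            · rw [PySem.Dict.get?_insert, if_pos rfl]
            · rw [PySem.Dict.get?_insert, if_pos rfl]
            · rw [show ((i + 1 : Nat) : Int) - 1 = ((i : Nat) : Int) by push_cast; ring,
                  PySem.List.pyGetD_pySetD_natCast _ _ _ _ _ (by simp [PySem.List.length_pySetD]; omega),
                  if_neg (by omega),
                  PySem.List.pyGetD_pySetD_natCast _ _ _ _ _ hlt,
                  if_neg (by omega)]
              exact hval
          · rcases hmap ch with ⟨hA', hB'⟩ | ⟨j', v', hj', h1j', hji', hev', hdpv'⟩
            · refine Or.inl ⟨?_, ?_⟩ <;> rw [PySem.Dict.get?_insert] <;> simp [hE, hA', hB']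
            · refine Or.inr ⟨j', v', ?_, h1j', by omega, ?_, ?_⟩
              · rw [PySem.Dict.get?_insert, if_neg hE]; exact hj'
              · rw [PySem.Dict.get?_insert, if_neg hE]; exact hev'
              · rw [show (j' : Int) - 1 = ((j' - 1 : Nat) : Int) by omega] at hdpv' ⊢
                rw [PySem.List.pyGetD_pySetD_natCast _ _ _ _ _ (by simp [PySem.List.length_pySetD]; omega),
                    if_neg (by omega),
                    PySem.List.pyGetD_pySetD_natCast _ _ _ _ _ hlt,
                    if_neg (by omega)]
                exact hdpv'
    · have hc' : (pvStA cs i).2.contains cs[i] = false := by simpa using hc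
      rcases hmap cs[i] with ⟨hA, hB⟩ | ⟨j, v, hj, h1j, hji, hev, hdpv⟩
      swap
      · rw [PySem.Dict.contains_eq_isSome_get?, hj] at hc'
        simp at hc'
      have hBc : (pvStB cs i).contains cs[i] = false := by
        rw [PySem.Dict.contains_eq_isSome_get?, hB]; rfl
      have hsum : ((pvStB cs i).insert cs[i] (1 + (pvStB cs i).values.sum)).values.sum
          = (pvStB cs i).values.sum + (1 + (pvStB cs i).values.sum) := by
        rw [pv_values_sum_insert _ hnd, PySem.Dict.getD_of_not_contains _ _ hBc]
        ring
      rw [if_neg (by simp [hc'])]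
      refine ⟨by simp [PySem.List.length_pySetD, hlen], ?_,
          PySem.Dict.nodup_keys_insert _ _ _ hnd, ?_⟩
      · rw [PySem.List.pyGetD_pySetD_natCast _ _ _ _ _ hlt, if_pos rfl, hsum]
        ring
      · intro ch
        by_cases hE : ch = cs[i]
        · subst hE
          refine Or.inr ⟨i + 1, 1 + (pvStB cs i).values.sum, ?_, by omega, by omega, ?_, ?_⟩
          · rw [PySem.Dict.get?_insert, if_pos rfl]
          · rw [PySem.Dict.get?_insert, if_pos rfl]
          · rw [show ((i + 1 : Nat) : Int) - 1 = ((i : Nat) : Int) by push_cast; ring,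
                PySem.List.pyGetD_pySetD_natCast _ _ _ _ _ hlt, if_neg (by omega)]
            exact hval
        · rcases hmap ch with ⟨hA', hB'⟩ | ⟨j', v', hj', h1j', hji', hev', hdpv'⟩
          · refine Or.inl ⟨?_, ?_⟩ <;> rw [PySem.Dict.get?_insert] <;> simp [hE, hA', hB']
          · refine Or.inr ⟨j', v', ?_, h1j', by omega, ?_, ?_⟩
            · rw [PySem.Dict.get?_insert, if_neg hE]; exact hj'
            · rw [PySem.Dict.get?_insert, if_neg hE]; exact hev'
            · rw [show (j' : Int) - 1 = ((j' - 1 : Nat) : Int) by omega] at hdpv' ⊢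
              rw [PySem.List.pyGetD_pySetD_natCast _ _ _ _ _ hlt, if_neg (by omega)]
              exact hdpv'

lemma pvDistinct_eq (cs : List Char) : pvDistinctA cs = pvDistinctB cs := by
  have h := (pv_inv cs cs.length le_rfl).2.1
  unfold pvDistinctA pvDistinctB
  unfold pvStA pvStB at h
  rw [List.take_length] at h
  exact h

-- ===== VERDICT (by name: the statement is the Claim_ definition above) =====
theorem betterString_spec : Claim_equal_betterString := by
  intro str1 str2 _
  unfold Spec_betterString betterString betterString_alt
  rw [pvDistinct_eq, pvDistinct_eq]
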